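-- pv_equiv track=rewrite | github.com/jamez-eh/PanPredic | data_shape.py | eval_vectors
-- ===== SOURCE A (Python) =====
-- def eval_vectors(gen_pan, pan_genome):
--     '''
--
--     :param gen_pan: a dictorary in form {genome: [region, ....], genome:  .........}
--     :param pan_genome: a list of all pangenome regions
--     :return: vector_dict: a dictionary of genomes with assoc bitmap vector of presence or abscence of a pangenome region
--     '''
--
--     vector_dict = {}
--
--     for genome in gen_pan:
--
--         vector_dict[genome] = []
--
--         for pan in pan_genome:
--
--             if pan in gen_pan[genome]:
--                 vector_dict[genome].append(1)
--             else:
--                 vector_dict[genome].append(0)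
--
--     return vector_dict
-- ===== SOURCE B (Python) =====
-- def eval_vectors(gen_pan, pan_genome):
--     # Inverted index: pangenome region -> list of positions it occupies.
--     index = {}
--     for i, region in enumerate(pan_genome):
--         index.setdefault(region, []).append(i)
--     n = len(pan_genome)
--     vector_dict = {}
--     for genome, regions in gen_pan.items():
--         vec = [0] * n
--         for r in regions:
--             for p in index.get(r, []):
--                 vec[p] = 1
--         vector_dict[genome] = vec
--     return vector_dict
-- ===== Notes on version B (the rewrite author's own statement) =====
-- stated objective: faster
-- what changed: Replaces the per-genome membership scan over pan_genome with a precomputed inverted index (region -> positions) and scatter-writes of 1s into a zero vector per genome.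
import Mathlib
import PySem

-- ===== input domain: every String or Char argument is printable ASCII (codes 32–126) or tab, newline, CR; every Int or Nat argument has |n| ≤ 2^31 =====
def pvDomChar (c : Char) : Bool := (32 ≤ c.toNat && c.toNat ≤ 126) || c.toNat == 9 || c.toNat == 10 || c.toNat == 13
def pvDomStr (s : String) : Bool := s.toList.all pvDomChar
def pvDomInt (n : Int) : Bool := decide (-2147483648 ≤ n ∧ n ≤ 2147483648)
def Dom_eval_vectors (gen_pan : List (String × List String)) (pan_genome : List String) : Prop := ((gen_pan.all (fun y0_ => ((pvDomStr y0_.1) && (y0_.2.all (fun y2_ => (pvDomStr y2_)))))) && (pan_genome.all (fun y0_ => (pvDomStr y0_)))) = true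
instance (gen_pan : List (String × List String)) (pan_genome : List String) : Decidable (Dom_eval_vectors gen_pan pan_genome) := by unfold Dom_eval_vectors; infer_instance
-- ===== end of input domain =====

-- B replaces A's per-genome membership scan over pan_genome by a precomputed inverted
-- index (region -> positions) and scatter-writes of 1s into a per-genome zero vector.

-- ===== PORT A =====
-- gen_pan is a Python dict: the assoc list is converted with Dict.ofList; 'for genome in gen_pan'
-- iterates its keys; 'gen_pan[genome]' is ported as getD [] (the key is always present, so exact).
def eval_vectors (gen_pan : List (String × List String)) (pan_genome : List String) : List (String × List Int) :=
  let gp := PySem.Dict.ofList gen_pan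
  ((gp.keys).foldl (fun vector_dict genome =>
      vector_dict.insert genome
        (pan_genome.foldl (fun acc pan =>
            acc ++ [if (gp.getD genome []).contains pan then (1 : Int) else 0]) []))
    PySem.Dict.empty).items

-- ===== PORT B =====
-- 'index.setdefault(region, []).append(i)' is Dict.modify region [] (· ++ [i]);
-- 'vec[p] = 1' is PySem.List.pySetD (every stored position is a valid index, so exact).
def eval_vectors_alt (gen_pan : List (String × List String)) (pan_genome : List String) : List (String × List Int) :=
  let index := (PySem.List.enumerate pan_genome 0).foldl
      (fun d p => d.modify p.2 [] (· ++ [p.1])) PySem.Dict.empty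
  let n := pan_genome.length
  (((PySem.Dict.ofList gen_pan).items).foldl (fun vector_dict gr =>
      vector_dict.insert gr.1
        (gr.2.foldl (fun vec r =>
            (index.getD r []).foldl (fun vec p => PySem.List.pySetD vec p 1) vec)
          (List.replicate n (0 : Int))))
    PySem.Dict.empty).items

-- ===== PRECONDITION & SPEC =====
def Spec_eval_vectors (gen_pan : List (String × List String)) (pan_genome : List String) (out : List (String × List Int)) : Prop := out = eval_vectors_alt gen_pan pan_genome
instance (gen_pan : List (String × List String)) (pan_genome : List String) (out : List (String × List Int)) : Decidable (Spec_eval_vectors gen_pan pan_genome out) := by unfold Spec_eval_vectors; infer_instance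

-- ===== CLAIM (what is proved, stated in full; the proofs are below) =====
def Claim_equal_eval_vectors : Prop := ∀ (gen_pan : List (String × List String)) (pan_genome : List String), Dom_eval_vectors gen_pan pan_genome → Spec_eval_vectors gen_pan pan_genome (eval_vectors gen_pan pan_genome)

-- ===== LEMMAS AND PROOFS =====

-- the positions of region r in pan_genome (what B's inverted index stores at key r)
def pvPos (pan_genome : List String) (r : String) : List Int :=
  (((PySem.List.enumerate pan_genome 0).map (fun p => (p.2, p.1))).filter (fun p => p.1 == r)).map (·.2)

lemma index_getD (pan_genome : List String) (r : String) :
    ((PySem.List.enumerate pan_genome 0).foldl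
        (fun d p => d.modify p.2 [] (· ++ [p.1])) PySem.Dict.empty).getD r []
      = pvPos pan_genome r := by
  have h := List.foldl_map (f := fun q : Int × String => (q.2, q.1))
      (g := fun (d : PySem.Dict String (List Int)) (p : String × Int) => d.modify p.1 [] (· ++ [p.2]))
      (l := PySem.List.enumerate pan_genome 0) (init := PySem.Dict.empty)
  simp only at h
  rw [← h, PySem.Dict.getD_foldl_modify_append]
  simp [pvPos]

lemma mem_pvPos (pan_genome : List String) (r : String) (j : Nat) (hj : j < pan_genome.length) :
    ((j : Int) ∈ pvPos pan_genome r) ↔ pan_genome[j] = r := by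
  simp [pvPos, List.mem_map, List.mem_filter, PySem.List.mem_enumerate_iff]
  constructor
  · rintro ⟨_, h⟩; exact h
  · intro h; exact ⟨hj, h⟩

lemma pvPos_nonneg (pan_genome : List String) (r : String) :
    ∀ p ∈ pvPos pan_genome r, 0 ≤ p := by
  simp only [pvPos, List.mem_map, List.mem_filter, PySem.List.mem_enumerate_iff]
  rintro p ⟨q, ⟨⟨s, ⟨k, hk, rfl⟩, rfl⟩, -⟩, rfl⟩
  positivity

lemma setfold_length (ps : List Int) (v : List Int) :
    (ps.foldl (fun v p => PySem.List.pySetD v p 1) v).length = v.length := by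
  induction ps generalizing v with
  | nil => rfl
  | cons p ps ih => simp [List.foldl_cons, ih, PySem.List.length_pySetD]

lemma setfold_getElem? (ps : List Int) (hps : ∀ p ∈ ps, 0 ≤ p) (v : List Int) (j : Nat) :
    (ps.foldl (fun v p => PySem.List.pySetD v p 1) v)[j]?
      = if (j : Int) ∈ ps ∧ j < v.length then some 1 else v[j]? := by
  induction ps generalizing v with
  | nil => simp
  | cons p ps ih =>
    have hp : 0 ≤ p := hps p (by simp)
    rw [List.foldl_cons, ih (fun q hq => hps q (by simp [hq]))]
    rw [PySem.List.pySetD_of_nonneg (h := hp)]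
    simp only [List.length_set, List.getElem?_set, List.mem_cons]
    by_cases hj : (j : Int) = p
    · have : p.toNat = j := by omega
      by_cases hlt : j < v.length <;> simp_all
    · have hne : p.toNat ≠ j := by omega
      by_cases h2 : (j : Int) ∈ ps
      · simp [hj, h2, hne]
      · simp [hj, h2, hne]

lemma vecfold_getElem? (pg : List String) (regs : List String) (v : List Int) (j : Nat) :
    (regs.foldl (fun vec r => (pvPos pg r).foldl (fun vec p => PySem.List.pySetD vec p 1) vec) v)[j]?
      = if (∃ r ∈ regs, (j : Int) ∈ pvPos pg r) ∧ j < v.length then some 1 else v[j]? := by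
  induction regs generalizing v with
  | nil => simp
  | cons r regs ih =>
    rw [List.foldl_cons, ih, setfold_length, setfold_getElem? _ (pvPos_nonneg pg r)]
    by_cases hl : j < v.length
    · by_cases h1 : (j : Int) ∈ pvPos pg r
      · simp [hl, h1]
      · by_cases h2 : ∃ r' ∈ regs, (j : Int) ∈ pvPos pg r'
        · simp [hl, h1, h2]
        · simp [hl, h1, h2]
    · simp [hl]

lemma vec_eq (pan_genome : List String) (regs : List String) :
    regs.foldl (fun vec r =>
        (pvPos pan_genome r).foldl (fun vec p => PySem.List.pySetD vec p 1) vec)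
      (List.replicate pan_genome.length (0 : Int))
    = pan_genome.map (fun pan => if regs.contains pan then (1 : Int) else 0) := by
  apply List.ext_getElem?
  intro j
  rw [vecfold_getElem?, List.getElem?_map]
  by_cases hj : j < pan_genome.length
  · have hmem : (∃ r ∈ regs, (j : Int) ∈ pvPos pan_genome r) ↔ pan_genome[j] ∈ regs := by
      constructor
      · rintro ⟨r, hr, hp⟩; rw [(mem_pvPos pan_genome r j hj).mp hp]; exact hr
      · intro h; exact ⟨pan_genome[j], h, (mem_pvPos _ _ j hj).mpr rfl⟩
    rw [List.getElem?_eq_getElem hj]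
    by_cases hin : pan_genome[j] ∈ regs
    · simp [hmem, hj, hin]
    · simp [hmem, hj, hin]
  · simp [hj]

-- ===== VERDICT (by name: the statement is the Claim_ definition above) =====
theorem eval_vectors_spec : Claim_equal_eval_vectors := by
  intro gen_pan pan_genome _
  unfold Spec_eval_vectors eval_vectors eval_vectors_alt
  simp only [index_getD]
  rw [PySem.Dict.items_eq_map_keys (PySem.Dict.ofList gen_pan) (PySem.Dict.nodup_keys_ofList gen_pan) ([] : List String)]
  rw [List.foldl_map]
  refine congrArg PySem.Dict.items (PySem.List.foldl_congr_mem _ _ _ _ ?_)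
  intro vd g _
  rw [vec_eq, PySem.List.foldl_append_singleton_eq_map]
  simp
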